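-- pv_equiv track=rewrite | github.com/jliznaga/algorithms | tes2.py | solution
-- ===== SOURCE A (Python) =====
-- def solution(S):
--     i = 0
--     numbers = []
--     signs = []
--     while i < len(S):
--         if S[i : i + 3] == "one":
--             numbers.append(1)
--             i += 3
--         elif S[i : i + 3] == "two":
--             numbers.append(2)
--             i += 3
--         elif S[i] == "+":
--             signs.append("+")
--             i += 1
--         elif S[i] == "-":
--             signs.append("-")
--             i += 1
--         else:
--             i += 1
--
--     if numbers:
--         sum = numbers[0]
--     else:
--         return 0
--
--     for j in range(1, len(numbers)):
--         if j - 1 < len(signs):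
--             if signs[j - 1] == "+":
--                 sum += numbers[j]
--             elif signs[j - 1] == "-":
--                 sum -= numbers[j]
--
--     return sum
-- ===== SOURCE B (Python) =====
-- def _feed(buf):
--     # Consume buf (length <= 3) left to right; return (token or None, new buf).
--     # The buffer left behind is always a proper prefix of "one" or "two".
--     while buf:
--         if buf == "one":
--             return 1, ""
--         if buf == "two":
--             return 2, ""
--         if "one".startswith(buf) or "two".startswith(buf):
--             return None, buf
--         if buf in ("+", "-"):
--             return buf, ""
--         buf = buf[1:]
--     return None, ""
--
--
-- def solution(S):
--     # Streaming single pass: a character-level matcher (no index arithmetic,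
--     # no slicing) feeds tokens to an online pairer that applies each sign to
--     # its matching number as soon as both have arrived, using two FIFO queues
--     # instead of building complete number/sign lists and pairing by index.
--     buf = ""
--     total = 0
--     have_first = False
--     wait_sign = []   # numbers (after the first) whose sign has not arrived yet
--     wait_num = []    # signs whose number has not arrived yet
--     for c in S:
--         tok, buf = _feed(buf + c)
--         if tok is None:
--             continue
--         if tok in ("+", "-"):
--             if wait_sign:
--                 n = wait_sign.pop(0)
--                 total = total + n if tok == "+" else total - n
--             else:
--                 wait_num.append(tok)
--         elif not have_first:
--             total = tok
--             have_first = True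
--         elif wait_num:
--             sg = wait_num.pop(0)
--             total = total + tok if sg == "+" else total - tok
--         else:
--             wait_sign.append(tok)
--     return total
-- ===== Notes on version B (the rewrite author's own statement) =====
-- stated objective: alternative
-- what changed: Replaces A's two-phase tokenize-into-lists-then-index-pair design with a single streaming pass: a character-level buffer matcher emits tokens one at a time and an online pairer applies each sign to its matching number as soon as both have arrived, via two FIFO queues, never materialising the number/sign lists or using index arithmetic.
import Mathlib
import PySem

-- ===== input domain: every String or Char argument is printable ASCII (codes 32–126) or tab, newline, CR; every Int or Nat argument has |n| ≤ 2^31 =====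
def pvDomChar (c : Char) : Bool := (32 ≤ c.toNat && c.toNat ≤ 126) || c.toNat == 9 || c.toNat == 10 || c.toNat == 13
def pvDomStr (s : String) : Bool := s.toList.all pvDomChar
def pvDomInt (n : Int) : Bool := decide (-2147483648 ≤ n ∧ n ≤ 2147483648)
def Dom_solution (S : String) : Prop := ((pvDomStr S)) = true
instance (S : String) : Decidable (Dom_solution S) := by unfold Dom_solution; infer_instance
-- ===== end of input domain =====

-- B replaces A's tokenize-into-lists-then-index-pair design with one streaming pass:
-- a character-level buffer matcher feeds tokens to an online pairer with two FIFO
-- queues; no number/sign lists and no index arithmetic (alternative, not faster).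

-- ===== PORT A =====
-- the while loop of A: state (i, numbers, signs), i advancing by 3 or 1
def solutionScan (cs : List Char) (i : Nat) (numbers : List Int) (signs : List String) :
    List Int × List String :=
  if _h : i < cs.length then
    if PySem.List.slice cs (some (i : Int)) (some ((i : Int) + 3)) = ['o', 'n', 'e'] then
      solutionScan cs (i + 3) (numbers ++ [1]) signs
    else if PySem.List.slice cs (some (i : Int)) (some ((i : Int) + 3)) = ['t', 'w', 'o'] then
      solutionScan cs (i + 3) (numbers ++ [2]) signs
    else if PySem.List.pyGet? cs (i : Int) = some '+' then
      solutionScan cs (i + 1) numbers (signs ++ ["+"])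
    else if PySem.List.pyGet? cs (i : Int) = some '-' then
      solutionScan cs (i + 1) numbers (signs ++ ["-"])
    else
      solutionScan cs (i + 1) numbers signs
  else (numbers, signs)
termination_by cs.length - i

def solution (S : String) : Int :=
  let p := solutionScan S.toList 0 [] []
  let numbers := p.1
  let signs := p.2
  match numbers with
  | [] => 0                                   -- "if numbers: … else: return 0"
  | n0 :: _ =>
    (PySem.List.pyRange 1 (numbers.length : Int) 1).foldl (fun sum j =>
      if j - 1 < (signs.length : Int) then
        if PySem.List.pyGetD signs (j - 1) "" = "+" then sum + PySem.List.pyGetD numbers j 0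
        else if PySem.List.pyGetD signs (j - 1) "" = "-" then sum - PySem.List.pyGetD numbers j 0
        else sum
      else sum) n0

-- ===== PORT B =====
-- _feed: consume the buffer left to right; a token is Int ⊕ Char (1/2 or '+'/'-')
def feedB : List Char → Option (Int ⊕ Char) × List Char
  | [] => (none, [])
  | c :: t =>
    if c :: t = ['o', 'n', 'e'] then (some (Sum.inl 1), [])
    else if c :: t = ['t', 'w', 'o'] then (some (Sum.inl 2), [])
    else if List.isPrefixOf (c :: t) ['o', 'n', 'e'] || List.isPrefixOf (c :: t) ['t', 'w', 'o'] then
      (none, c :: t)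
    else if c :: t = ['+'] then (some (Sum.inr '+'), [])
    else if c :: t = ['-'] then (some (Sum.inr '-'), [])
    else feedB t

-- the body of B's for-loop: state (buf, total, have_first, wait_sign, wait_num)
def stepB (st : List Char × Int × Bool × List Int × List Char) (c : Char) :
    List Char × Int × Bool × List Int × List Char :=
  match st with
  | (buf, total, have_first, wait_sign, wait_num) =>
    match feedB (buf ++ [c]) with
    | (none, buf') => (buf', total, have_first, wait_sign, wait_num)
    | (some (Sum.inr sg), buf') =>
      match wait_sign with
      | n :: ws => (buf', (if sg = '+' then total + n else total - n), have_first, ws, wait_num)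
      | [] => (buf', total, have_first, [], wait_num ++ [sg])
    | (some (Sum.inl n), buf') =>
      if have_first = false then (buf', n, true, wait_sign, wait_num)
      else
        match wait_num with
        | sg :: wn => (buf', (if sg = '+' then total + n else total - n), have_first, wait_sign, wn)
        | [] => (buf', total, have_first, wait_sign ++ [n], wait_num)

def solution_alt (S : String) : Int :=
  (S.toList.foldl stepB ([], 0, false, [], [])).2.1

-- ===== PRECONDITION & SPEC =====
def Spec_solution (S : String) (out : Int) : Prop := out = solution_alt S
instance (S : String) (out : Int) : Decidable (Spec_solution S out) := by unfold Spec_solution; infer_instance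

-- ===== CLAIM (what is proved, stated in full; the proofs are below) =====
def Claim_equal_solution : Prop := ∀ (S : String), Dom_solution S → Spec_solution S (solution S)

-- ===== LEMMAS AND PROOFS =====

-- the token stream both programs extract
inductive PvTok : Type
  | n1 | n2 | pl | mi
deriving DecidableEq, Repr

def pvTok : List Char → List PvTok
  | [] => []
  | c :: t =>
    if (c :: t).take 3 = ['o', 'n', 'e'] then .n1 :: pvTok (t.drop 2)
    else if (c :: t).take 3 = ['t', 'w', 'o'] then .n2 :: pvTok (t.drop 2)
    else if c = '+' then .pl :: pvTok t
    else if c = '-' then .mi :: pvTok t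
    else pvTok t
termination_by l => l.length
decreasing_by all_goals simp [List.length_drop]

def pvNums (ts : List PvTok) : List Int :=
  ts.filterMap (fun t => match t with | .n1 => some 1 | .n2 => some 2 | _ => none)

def pvBools (ts : List PvTok) : List Bool :=
  ts.filterMap (fun t => match t with | .pl => some true | .mi => some false | _ => none)

def pvVal : PvTok → Int ⊕ Char
  | .n1 => Sum.inl 1 | .n2 => Sum.inl 2 | .pl => Sum.inr '+' | .mi => Sum.inr '-'

-- stepB's token handling, on the abstract token stream (state without the buffer)
def pvApply (σ : Int × Bool × List Int × List Char) (tk : PvTok) :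
    Int × Bool × List Int × List Char :=
  match pvVal tk with
  | Sum.inr sg =>
    match σ with
    | (total, hf, n :: ws, wn) => ((if sg = '+' then total + n else total - n), hf, ws, wn)
    | (total, hf, [], wn) => (total, hf, [], wn ++ [sg])
  | Sum.inl n =>
    match σ with
    | (total, hf, ws, wn) =>
      if hf = false then (n, true, ws, wn)
      else
        match wn with
        | sg :: wn' => ((if sg = '+' then total + n else total - n), hf, ws, wn')
        | [] => (total, hf, ws ++ [n], wn)

-- the buffer is always a proper prefix of "one" or "two"
def PBuf (b : List Char) : Prop :=
  b = [] ∨ b = ['o'] ∨ b = ['o', 'n'] ∨ b = ['t'] ∨ b = ['t', 'w']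

def pvSumPair : List Bool → List Int → Int → Int
  | b :: bs, x :: ns, acc => pvSumPair bs ns (if b then acc + x else acc - x)
  | _, _, acc => acc

theorem pvSumPair_nil (bs : List Bool) (acc : Int) : pvSumPair bs [] acc = acc := by
  cases bs <;> rfl

theorem pvSumPair_nilb (ns : List Int) (acc : Int) : pvSumPair [] ns acc = acc := by
  cases ns <;> rfl

-- ---- A side ----

theorem pvSlice3 (cs : List Char) (i : Nat) :
    PySem.List.slice cs (some (i : Int)) (some ((i : Int) + 3)) = (cs.drop i).take 3 := by
  have := PySem.List.slice_natCast_add (xs := cs) (j := i) (n := 3)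
  simpa using this

theorem solutionScan_eq (cs : List Char) (i : Nat) (numbers : List Int) (signs : List String) :
    solutionScan cs i numbers signs =
      (numbers ++ pvNums (pvTok (cs.drop i)),
       signs ++ (pvBools (pvTok (cs.drop i))).map (fun b => if b then "+" else "-")) := by
  induction i, numbers, signs using solutionScan.induct cs with
  | case1 i numbers signs h h1 ih =>
    rw [solutionScan, dif_pos h, if_pos h1, ih]
    rw [pvSlice3] at h1
    obtain ⟨c, t', hd⟩ : ∃ c t', cs.drop i = c :: t' := by
      cases hdd : cs.drop i with
      | nil => rw [hdd] at h1; simp at h1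
      | cons a b => exact ⟨a, b, rfl⟩
    have h3 : cs.drop (i + 3) = t'.drop 2 := by
      have : cs.drop (i + 3) = (cs.drop i).drop 3 := by rw [List.drop_drop]
      rw [this, hd]; simp
    rw [hd] at h1 ⊢
    rw [h3, pvTok, if_pos h1]
    simp [pvNums, pvBools]
  | case2 i numbers signs h h1 h2 ih =>
    rw [solutionScan, dif_pos h, if_neg h1, if_pos h2, ih]
    rw [pvSlice3] at h1 h2
    obtain ⟨c, t', hd⟩ : ∃ c t', cs.drop i = c :: t' := by
      cases hdd : cs.drop i with
      | nil => rw [hdd] at h2; simp at h2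
      | cons a b => exact ⟨a, b, rfl⟩
    have h3 : cs.drop (i + 3) = t'.drop 2 := by
      have : cs.drop (i + 3) = (cs.drop i).drop 3 := by rw [List.drop_drop]
      rw [this, hd]; simp
    rw [hd] at h1 h2 ⊢
    rw [h3, pvTok, if_neg h1, if_pos h2]
    simp [pvNums, pvBools]
  | case3 i numbers signs h h1 h2 h3 ih =>
    rw [solutionScan, dif_pos h, if_neg h1, if_neg h2, if_pos h3, ih]
    rw [pvSlice3] at h1 h2
    rw [PySem.List.pyGet?_natCast, ← List.head?_drop] at h3
    obtain ⟨c, t', hd⟩ : ∃ c t', cs.drop i = c :: t' := by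
      cases hdd : cs.drop i with
      | nil => rw [hdd] at h3; simp at h3
      | cons a b => exact ⟨a, b, rfl⟩
    have h4 : cs.drop (i + 1) = t' := by
      have : cs.drop (i + 1) = (cs.drop i).drop 1 := by rw [List.drop_drop]
      rw [this, hd]; simp
    rw [hd] at h1 h2 h3 ⊢
    simp at h3
    rw [h4, pvTok, if_neg h1, if_neg h2, if_pos h3]
    simp [pvNums, pvBools]
  | case4 i numbers signs h h1 h2 h3 h4 ih =>
    rw [solutionScan, dif_pos h, if_neg h1, if_neg h2, if_neg h3, if_pos h4, ih]
    rw [pvSlice3] at h1 h2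
    rw [PySem.List.pyGet?_natCast, ← List.head?_drop] at h3 h4
    obtain ⟨c, t', hd⟩ : ∃ c t', cs.drop i = c :: t' := by
      cases hdd : cs.drop i with
      | nil => rw [hdd] at h4; simp at h4
      | cons a b => exact ⟨a, b, rfl⟩
    have h5 : cs.drop (i + 1) = t' := by
      have : cs.drop (i + 1) = (cs.drop i).drop 1 := by rw [List.drop_drop]
      rw [this, hd]; simp
    rw [hd] at h1 h2 h3 h4 ⊢
    simp at h3 h4
    rw [h5, pvTok, if_neg h1, if_neg h2, if_neg h3, if_pos h4]
    simp [pvNums, pvBools]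
  | case5 i numbers signs h h1 h2 h3 h4 ih =>
    rw [solutionScan, dif_pos h, if_neg h1, if_neg h2, if_neg h3, if_neg h4, ih]
    rw [pvSlice3] at h1 h2
    rw [PySem.List.pyGet?_natCast, ← List.head?_drop] at h3 h4
    obtain ⟨c, t', hd⟩ : ∃ c t', cs.drop i = c :: t' := by
      have : i < cs.length := h
      cases hdd : cs.drop i with
      | nil => rw [List.drop_eq_nil_iff] at hdd; omega
      | cons a b => exact ⟨a, b, rfl⟩
    have h5 : cs.drop (i + 1) = t' := by
      have : cs.drop (i + 1) = (cs.drop i).drop 1 := by rw [List.drop_drop]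
      rw [this, hd]; simp
    rw [hd] at h1 h2 h3 h4 ⊢
    simp at h3 h4
    rw [h5, pvTok, if_neg h1, if_neg h2, if_neg h3, if_neg h4]
  | case6 i numbers signs h =>
    rw [solutionScan, dif_neg h]
    have : cs.drop i = [] := by
      simp at h
      simp [List.drop_eq_nil_iff, h]
    rw [this]
    simp [pvTok, pvNums, pvBools]

theorem foldA_gen (bs : List Bool) (ns : List Int) :
    ∀ (m k : Nat) (acc : Int), ns.length - (k + 1) ≤ m →
      (PySem.List.pyRange ((k : Int) + 1) (ns.length : Int) 1).foldl (fun sum j =>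
          if j - 1 < ((bs.map (fun b => if b then "+" else "-")).length : Int) then
            if PySem.List.pyGetD (bs.map (fun b => if b then "+" else "-")) (j - 1) "" = "+" then
              sum + PySem.List.pyGetD ns j 0
            else if PySem.List.pyGetD (bs.map (fun b => if b then "+" else "-")) (j - 1) "" = "-" then
              sum - PySem.List.pyGetD ns j 0
            else sum
          else sum) acc = pvSumPair (bs.drop k) (ns.drop (k + 1)) acc := by
  intro m
  induction m with
  | zero =>
    intro k acc hm
    rw [PySem.List.pyRange_one_eq_nil (by omega)]
    rw [show ns.drop (k + 1) = [] from List.drop_eq_nil_iff.mpr (by omega), pvSumPair_nil]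
    rfl
  | succ m ih =>
    intro k acc hm
    by_cases hlt : k + 1 < ns.length
    · rw [PySem.List.pyRange_one_cons (by omega)]
      rw [List.foldl_cons]
      have hj1 : ((k : Int) + 1 - 1) = ((k : Nat) : Int) := by ring
      have hj : ((k : Int) + 1) = (((k + 1 : Nat)) : Int) := by push_cast; ring
      rw [hj1, hj, PySem.List.pyGetD_natCast, PySem.List.pyGetD_natCast]
      have hns : ns.getD (k + 1) 0 = ns[k + 1]'(by omega) := List.getD_eq_getElem ns 0 (by omega)
      have hdropn : ns.drop (k + 1) = ns[k + 1]'(by omega) :: ns.drop (k + 2) :=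
        List.drop_eq_getElem_cons (by omega)
      by_cases hk : k < bs.length
      · have hsg : (bs.map (fun b => if b then "+" else "-")).getD k "" =
            (if bs[k]'(by omega) then "+" else "-") := by
          rw [List.getD_eq_getElem _ _ (by simp; omega)]
          simp
        have hdropb : bs.drop k = bs[k]'(by omega) :: bs.drop (k + 1) :=
          List.drop_eq_getElem_cons (by omega)
        rw [hsg, hns]
        rw [if_pos (by simp; omega)]
        rw [hdropb, hdropn]
        cases hbk : bs[k]'(by omega) with
        | true =>
          simp only [reduceIte]
          rw [ih (k + 1) _ (by omega)]
          simp [pvSumPair, show k + 1 + 1 = k + 2 from rfl]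
        | false =>
          rw [show ((if false = true then "+" else "-") : String) = "-" from by decide]
          rw [if_neg (by decide), if_pos rfl]
          rw [ih (k + 1) _ (by omega)]
          simp [pvSumPair, show k + 1 + 1 = k + 2 from rfl]
      · rw [if_neg (by simp; omega)]
        rw [ih (k + 1) _ (by omega)]
        rw [show bs.drop (k + 1) = [] from List.drop_eq_nil_iff.mpr (by omega),
            show bs.drop k = [] from List.drop_eq_nil_iff.mpr (by omega)]
        rw [pvSumPair_nilb, pvSumPair_nilb]
    · rw [PySem.List.pyRange_one_eq_nil (by omega)]
      rw [show ns.drop (k + 1) = [] from List.drop_eq_nil_iff.mpr (by omega), pvSumPair_nil]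
      rfl

-- ---- B side: the streaming matcher emits exactly the token stream ----

theorem stepB_eq (b : List Char) (σ : Int × Bool × List Int × List Char) (c : Char)
    (ot : Option PvTok) (b' : List Char) (h : feedB (b ++ [c]) = (Option.map pvVal ot, b')) :
    stepB (b, σ) c = (b', (ot.toList).foldl pvApply σ) := by
  obtain ⟨tot, hf, ws, wn⟩ := σ
  cases ot with
  | none => simp [stepB, h]
  | some tk =>
    cases tk <;>
      simp only [stepB, h, Option.map_some, pvVal, Option.toList, List.foldl_cons,
        List.foldl_nil, pvApply] <;>
      (cases ws <;> cases wn <;> cases hf <;> rfl)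

-- one character into the EMPTY buffer
theorem feed_empty (c : Char) (rest : List Char) :
    ∃ (ot : Option PvTok) (b' : List Char),
      feedB [c] = (Option.map pvVal ot, b') ∧ PBuf b' ∧
        pvTok (c :: rest) = ot.toList ++ pvTok (b' ++ rest) := by
  by_cases ho : c = 'o'
  · exact ⟨none, ['o'], by simp [feedB, List.isPrefixOf, ho], by simp [PBuf], by simp [ho]⟩
  · by_cases ht : c = 't'
    · exact ⟨none, ['t'], by simp [feedB, List.isPrefixOf, ht], by simp [PBuf], by simp [ht]⟩
    · by_cases hp : c = '+'
      · refine ⟨some .pl, [], by simp [feedB, List.isPrefixOf, hp, pvVal], by simp [PBuf], ?_⟩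
        subst hp
        rw [pvTok]
        rw [if_neg (by simp), if_neg (by simp), if_pos rfl]
        simp
      · by_cases hm : c = '-'
        · refine ⟨some .mi, [], by simp [feedB, List.isPrefixOf, hm, pvVal], by simp [PBuf], ?_⟩
          subst hm
          rw [pvTok]
          simp
        · refine ⟨none, [], by simp [feedB, List.isPrefixOf, ho, ht, hp, hm], by simp [PBuf], ?_⟩
          rw [pvTok]
          rw [if_neg (by simp [ho]), if_neg (by simp [ht]), if_neg hp, if_neg hm]
          simp

-- one character into any reachable buffer
theorem feed_step (b : List Char) (hb : PBuf b) (c : Char) (rest : List Char) :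
    ∃ (ot : Option PvTok) (b' : List Char),
      feedB (b ++ [c]) = (Option.map pvVal ot, b') ∧ PBuf b' ∧
        pvTok (b ++ c :: rest) = ot.toList ++ pvTok (b' ++ rest) := by
  rcases hb with h | h | h | h | h <;> subst h
  · simpa using feed_empty c rest
  · -- buf = "o"
    by_cases hn : c = 'n'
    · exact ⟨none, ['o', 'n'], by simp [feedB, List.isPrefixOf, hn], by simp [PBuf], by simp [hn]⟩
    · obtain ⟨ot, b', h1, h2, h3⟩ := feed_empty c rest
      refine ⟨ot, b', ?_, h2, ?_⟩
      · simpa [feedB, List.isPrefixOf, hn] using h1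
      · simp only [List.cons_append, List.nil_append]
        rw [pvTok]
        rw [if_neg (by simp [hn]), if_neg (by simp), if_neg (by simp), if_neg (by simp)]
        exact h3
  · -- buf = "on"
    by_cases he : c = 'e'
    · refine ⟨some .n1, [], by simp [feedB, he, pvVal], by simp [PBuf], ?_⟩
      subst he
      simp only [List.cons_append, List.nil_append]
      rw [pvTok]
      rw [if_pos (by simp)]
      simp
    · obtain ⟨ot, b', h1, h2, h3⟩ := feed_empty c rest
      refine ⟨ot, b', ?_, h2, ?_⟩
      · simpa [feedB, List.isPrefixOf, he] using h1
      · simp only [List.cons_append, List.nil_append]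
        rw [pvTok]
        rw [if_neg (by simp [he]), if_neg (by simp), if_neg (by simp), if_neg (by simp)]
        rw [pvTok]
        rw [if_neg (by simp), if_neg (by simp), if_neg (by simp), if_neg (by simp)]
        exact h3
  · -- buf = "t"
    by_cases hw : c = 'w'
    · exact ⟨none, ['t', 'w'], by simp [feedB, List.isPrefixOf, hw], by simp [PBuf], by simp [hw]⟩
    · obtain ⟨ot, b', h1, h2, h3⟩ := feed_empty c rest
      refine ⟨ot, b', ?_, h2, ?_⟩
      · simpa [feedB, List.isPrefixOf, hw] using h1
      · simp only [List.cons_append, List.nil_append]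
        rw [pvTok]
        rw [if_neg (by simp), if_neg (by simp [hw]), if_neg (by simp), if_neg (by simp)]
        exact h3
  · -- buf = "tw"
    by_cases ho : c = 'o'
    · refine ⟨some .n2, [], by simp [feedB, ho, pvVal], by simp [PBuf], ?_⟩
      subst ho
      simp only [List.cons_append, List.nil_append]
      rw [pvTok]
      rw [if_neg (by simp), if_pos (by simp)]
      simp
    · obtain ⟨ot, b', h1, h2, h3⟩ := feed_empty c rest
      refine ⟨ot, b', ?_, h2, ?_⟩
      · simpa [feedB, List.isPrefixOf, ho] using h1
      · simp only [List.cons_append, List.nil_append]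
        rw [pvTok]
        rw [if_neg (by simp), if_neg (by simp [ho]), if_neg (by simp), if_neg (by simp)]
        rw [pvTok]
        rw [if_neg (by simp), if_neg (by simp), if_neg (by simp), if_neg (by simp)]
        exact h3

theorem pvTok_PBuf (b : List Char) (hb : PBuf b) : pvTok b = [] := by
  rcases hb with h | h | h | h | h <;> subst h <;> simp [pvTok]

theorem foldB_stream (cs : List Char) : ∀ (b : List Char) (σ : Int × Bool × List Int × List Char),
    PBuf b → (cs.foldl stepB (b, σ)).2 = (pvTok (b ++ cs)).foldl pvApply σ := by
  induction cs with
  | nil =>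
    intro b σ hb
    simp [pvTok_PBuf b hb]
  | cons c cs ih =>
    intro b σ hb
    obtain ⟨ot, b', h1, h2, h3⟩ := feed_step b hb c cs
    rw [List.foldl_cons, stepB_eq b σ c ot b' h1, ih b' _ h2, h3, List.foldl_append]

-- ---- B side: the online FIFO pairer computes the positional pair-sum ----

theorem foldTok_true (ts : List PvTok) :
    ∀ (tot : Int) (ws : List Int) (wn : List Char), ws = [] ∨ wn = [] →
      (ts.foldl pvApply (tot, true, ws, wn)).1 =
        pvSumPair (wn.map (fun c => c == '+') ++ pvBools ts) (ws ++ pvNums ts) tot := by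
  induction ts with
  | nil =>
    intro tot ws wn hinv
    rcases hinv with h | h <;> subst h <;>
      simp [pvBools, pvNums, pvSumPair_nil, pvSumPair_nilb]
  | cons t ts ih =>
    intro tot ws wn hinv
    cases t with
    | n1 =>
      cases wn with
      | nil =>
        rw [List.foldl_cons, show pvApply (tot, true, ws, []) .n1 = (tot, true, ws ++ [1], []) from rfl]
        rw [ih tot (ws ++ [1]) [] (Or.inr rfl)]
        simp [pvNums, pvBools]
      | cons sg wn' =>
        have hws : ws = [] := by rcases hinv with h | h; exact h; exact absurd h (by simp)
        subst hws
        rw [List.foldl_cons,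
          show pvApply (tot, true, [], sg :: wn') .n1 =
            ((if sg = '+' then tot + 1 else tot - 1), true, [], wn') from rfl]
        rw [ih _ [] wn' (Or.inl rfl)]
        simp only [pvNums, pvBools, List.filterMap_cons, List.map_cons, List.cons_append,
          List.nil_append, pvSumPair]
        by_cases h : sg = '+' <;> simp [h]
    | n2 =>
      cases wn with
      | nil =>
        rw [List.foldl_cons, show pvApply (tot, true, ws, []) .n2 = (tot, true, ws ++ [2], []) from rfl]
        rw [ih tot (ws ++ [2]) [] (Or.inr rfl)]
        simp [pvNums, pvBools]
      | cons sg wn' =>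
        have hws : ws = [] := by rcases hinv with h | h; exact h; exact absurd h (by simp)
        subst hws
        rw [List.foldl_cons,
          show pvApply (tot, true, [], sg :: wn') .n2 =
            ((if sg = '+' then tot + 2 else tot - 2), true, [], wn') from rfl]
        rw [ih _ [] wn' (Or.inl rfl)]
        simp only [pvNums, pvBools, List.filterMap_cons, List.map_cons, List.cons_append,
          List.nil_append, pvSumPair]
        by_cases h : sg = '+' <;> simp [h]
    | pl =>
      cases ws with
      | nil =>
        rw [List.foldl_cons, show pvApply (tot, true, [], wn) .pl = (tot, true, [], wn ++ ['+']) from rfl]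
        rw [ih tot [] (wn ++ ['+']) (Or.inl rfl)]
        simp [pvNums, pvBools]
      | cons n ws2 =>
        have hwn : wn = [] := by rcases hinv with h | h; exact absurd h (by simp); exact h
        subst hwn
        rw [List.foldl_cons,
          show pvApply (tot, true, n :: ws2, []) .pl = (tot + n, true, ws2, []) from rfl]
        rw [ih _ ws2 [] (Or.inr rfl)]
        simp [pvNums, pvBools, pvSumPair]
    | mi =>
      cases ws with
      | nil =>
        rw [List.foldl_cons, show pvApply (tot, true, [], wn) .mi = (tot, true, [], wn ++ ['-']) from rfl]
        rw [ih tot [] (wn ++ ['-']) (Or.inl rfl)]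
        simp [pvNums, pvBools]
      | cons n ws2 =>
        have hwn : wn = [] := by rcases hinv with h | h; exact absurd h (by simp); exact h
        subst hwn
        rw [List.foldl_cons,
          show pvApply (tot, true, n :: ws2, []) .mi = (tot - n, true, ws2, []) from rfl]
        rw [ih _ ws2 [] (Or.inr rfl)]
        simp [pvNums, pvBools, pvSumPair]

theorem foldTok_false (ts : List PvTok) : ∀ (wn : List Char),
    (ts.foldl pvApply (0, false, [], wn)).1 =
      match pvNums ts with
      | [] => 0
      | n0 :: rest => pvSumPair (wn.map (fun c => c == '+') ++ pvBools ts) rest n0 := by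
  induction ts with
  | nil => intro wn; simp [pvNums]
  | cons t ts ih =>
    intro wn
    cases t with
    | n1 =>
      rw [List.foldl_cons, show pvApply (0, false, [], wn) .n1 = (1, true, [], wn) from rfl]
      rw [foldTok_true ts 1 [] wn (Or.inl rfl)]
      simp [pvNums, pvBools]
    | n2 =>
      rw [List.foldl_cons, show pvApply (0, false, [], wn) .n2 = (2, true, [], wn) from rfl]
      rw [foldTok_true ts 2 [] wn (Or.inl rfl)]
      simp [pvNums, pvBools]
    | pl =>
      rw [List.foldl_cons, show pvApply (0, false, [], wn) .pl = (0, false, [], wn ++ ['+']) from rfl]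
      rw [ih (wn ++ ['+'])]
      rw [show pvNums (PvTok.pl :: ts) = pvNums ts from by simp [pvNums],
          show pvBools (PvTok.pl :: ts) = true :: pvBools ts from by simp [pvBools]]
      cases h : pvNums ts with
      | nil => rfl
      | cons n0 rest => simp
    | mi =>
      rw [List.foldl_cons, show pvApply (0, false, [], wn) .mi = (0, false, [], wn ++ ['-']) from rfl]
      rw [ih (wn ++ ['-'])]
      rw [show pvNums (PvTok.mi :: ts) = pvNums ts from by simp [pvNums],
          show pvBools (PvTok.mi :: ts) = false :: pvBools ts from by simp [pvBools]]
      cases h : pvNums ts with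
      | nil => rfl
      | cons n0 rest => simp

-- ===== VERDICT (by name: the statement is the Claim_ definition above) =====
theorem solution_spec : Claim_equal_solution := by
  intro S _hD
  unfold Spec_solution solution solution_alt
  have hA := solutionScan_eq S.toList 0 [] []
  simp only [List.drop_zero, List.nil_append] at hA
  have hB := foldB_stream S.toList [] (0, false, [], []) (Or.inl rfl)
  simp only [List.nil_append] at hB
  have hB1 : (S.toList.foldl stepB ([], 0, false, [], [])).2.1 =
      ((pvTok S.toList).foldl pvApply (0, false, [], [])).1 := by rw [hB]
  rw [hB1, foldTok_false (pvTok S.toList) []]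
  simp only [hA]
  set ts := pvTok S.toList with hts
  cases hns : pvNums ts with
  | nil => simp
  | cons n0 rest =>
    simp only
    have := foldA_gen (pvBools ts) (n0 :: rest) (n0 :: rest).length 0 n0 (by omega)
    simp only [Nat.cast_zero, zero_add, List.drop_zero, List.drop_one] at this
    rw [this]
    simp
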